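-- pv_equiv track=rewrite | github.com/Lukman-01/Coderbyte-Solutions-In-Python | Strings/Formated_Numbers.py | FormattedNumber
-- ===== SOURCE A (Python) =====
-- def FormattedNumber(strArr):
--     # Get the input string from strArr
--     input_string = strArr[0]
--
--     # Remove all commas from the input string
--     input_string = input_string.replace(",", "")
--
--     # Split the input string into two parts by the decimal point
--     parts = input_string.split(".")
--
--     # Check that there are at most two parts, and that each part consists only of digits
--     if len(parts) > 2 or not all(part.isdigit() for part in parts):
--         return "false"
--
--     # If there are two parts, check that the second part has no more than two digits
--     if len(parts) == 2 and len(parts[1]) > 2: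
--         return "false"
--
--     # Otherwise, the input is a properly formatted number
--     return "true"
-- ===== SOURCE B (Python) =====
-- def FormattedNumber(strArr):
--     s = strArr[0].replace(",", "")
--     seen_dot = False
--     int_digits = 0
--     frac_digits = 0
--     for c in s:
--         if c == ".":
--             if seen_dot:
--                 return "false"
--             seen_dot = True
--         elif c.isdigit():
--             if seen_dot:
--                 frac_digits += 1
--             else:
--                 int_digits += 1
--         else:
--             return "false"
--     if int_digits == 0:
--         return "false"
--     if seen_dot and (frac_digits == 0 or frac_digits > 2):
--         return "false"
--     return "true"
-- ===== Notes on version B (the rewrite author's own statement) =====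
-- stated objective: alternative
-- what changed: B validates the comma-stripped string in a single left-to-right pass with early exit, tracking a dot-seen flag and separate integer/fraction digit counts, instead of splitting on '.' and checking each part; Pre_ only excludes the empty argument list, on which A raises IndexError.
import Mathlib
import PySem

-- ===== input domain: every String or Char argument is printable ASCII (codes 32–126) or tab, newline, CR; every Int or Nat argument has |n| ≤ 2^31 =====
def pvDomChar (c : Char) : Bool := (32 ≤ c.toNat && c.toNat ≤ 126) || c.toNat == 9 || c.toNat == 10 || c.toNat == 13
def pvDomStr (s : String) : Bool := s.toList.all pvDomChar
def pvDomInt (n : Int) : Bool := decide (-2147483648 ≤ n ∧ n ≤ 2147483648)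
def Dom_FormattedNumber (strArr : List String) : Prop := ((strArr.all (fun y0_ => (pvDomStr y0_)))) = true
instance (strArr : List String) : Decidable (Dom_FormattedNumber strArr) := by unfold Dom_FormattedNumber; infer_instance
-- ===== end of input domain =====

-- B replaces A's split-on-'.'-then-check-parts by a single scan with a dot flag and two digit counters (same cost, different decomposition).

-- ===== PORT A =====
def FormattedNumber (strArr : List String) : String :=
  match strArr with
  | [] => ""  -- strArr[0] raises IndexError here; excluded by Pre_
  | s0 :: _ =>
    let inputString := PySem.Str.replace s0 "," ""
    let parts := PySem.Chars.splitOn inputString.toList ['.']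
    if 2 < parts.length || !(parts.all PySem.Chars.strIsdigit) then "false"
    else if parts.length == 2 && 2 < (PySem.List.pyGetD parts 1 []).length then "false"
    else "true"

-- ===== PORT B =====
-- scan state: seen = decimal point seen, ic / fc = digits counted before / after it
def fnScan : List Char → Bool → Nat → Nat → String
  | [], seen, ic, fc =>
    if ic = 0 then "false"
    else if seen && (fc = 0 || 2 < fc) then "false"
    else "true"
  | c :: rest, seen, ic, fc =>
    if c = '.' then
      if seen then "false" else fnScan rest true ic fc
    else if PySem.Chars.isdigit c then
      if seen then fnScan rest seen ic (fc + 1) else fnScan rest seen (ic + 1) fc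
    else "false"

def FormattedNumber_alt (strArr : List String) : String :=
  match strArr with
  | [] => ""  -- strArr[0] raises IndexError here; excluded by Pre_
  | s0 :: _ => fnScan (PySem.Str.replace s0 "," "").toList false 0 0

-- ===== PRECONDITION & SPEC =====
-- Pre_ excludes only the empty list, on which A's strArr[0] raises IndexError.
def Pre_FormattedNumber (strArr : List String) : Prop := strArr ≠ []
instance (strArr : List String) : Decidable (Pre_FormattedNumber strArr) := by unfold Pre_FormattedNumber; infer_instance
def pvWitness_FormattedNumber : List String := ["1.23"]
def Spec_FormattedNumber (strArr : List String) (out : String) : Prop := out = FormattedNumber_alt strArr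
instance (strArr : List String) (out : String) : Decidable (Spec_FormattedNumber strArr out) := by unfold Spec_FormattedNumber; infer_instance

-- ===== CLAIM =====
def Claim_equal_FormattedNumber : Prop := ∀ (strArr : List String), Dom_FormattedNumber strArr → Pre_FormattedNumber strArr → Spec_FormattedNumber strArr (FormattedNumber strArr)

-- ===== LEMMAS AND PROOFS =====
def consHead (x : List Char) : List (List Char) → List (List Char)
  | [] => [x]
  | p :: ps => (x ++ p) :: ps

def splitSpec : List Char → List (List Char)
  | [] => [[]]
  | c :: cs => if c = '.' then [] :: splitSpec cs else consHead [c] (splitSpec cs)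

theorem splitSpec_ne_nil (cs : List Char) : splitSpec cs ≠ [] := by
  cases cs with
  | nil => simp [splitSpec]
  | cons c cs =>
    simp only [splitSpec]
    split
    · simp
    · cases h : splitSpec cs <;> simp [consHead]

theorem consHead_nil (ps : List (List Char)) (h : ps ≠ []) : consHead [] ps = ps := by
  cases ps with
  | nil => exact absurd rfl h
  | cons p ps => simp [consHead]

theorem consHead_consHead (x y : List Char) (ps : List (List Char)) :
    consHead x (consHead y ps) = consHead (x ++ y) ps := by
  cases ps <;> simp [consHead]

theorem go_spec (fuel : Nat) : ∀ (l cur : List Char) (acc : List (List Char)), l.length < fuel →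
    PySem.Chars.splitOn.go ['.'] fuel l cur acc = acc.reverse ++ consHead cur.reverse (splitSpec l) := by
  induction fuel with
  | zero => intro l cur acc h; omega
  | succ n ih =>
    intro l cur acc h
    cases l with
    | nil => simp [PySem.Chars.splitOn.go, splitSpec, consHead]
    | cons c rest =>
      by_cases hc : c = '.'
      · subst hc
        have : List.isPrefixOf ['.'] ('.' :: rest) = true := by simp [List.isPrefixOf]
        simp only [PySem.Chars.splitOn.go, this, if_pos, List.length_singleton,
          List.drop_succ_cons, List.drop_zero]
        rw [ih rest [] (cur.reverse :: acc) (by simpa using Nat.lt_of_succ_lt_succ h)]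
        rw [List.reverse_nil, consHead_nil _ (splitSpec_ne_nil rest)]
        simp [splitSpec, consHead]
      · have : List.isPrefixOf ['.'] (c :: rest) = false := by
          simp [List.isPrefixOf]; exact fun hh => hc hh.symm
        simp only [PySem.Chars.splitOn.go, this, Bool.false_eq_true, if_false]
        rw [ih rest (c :: cur) acc (by simpa using Nat.lt_of_succ_lt_succ h)]
        simp [splitSpec, hc, consHead_consHead]

theorem splitOn_eq_splitSpec (cs : List Char) :
    PySem.Chars.splitOn cs ['.'] = splitSpec cs := by
  unfold PySem.Chars.splitOn
  rw [go_spec (cs.length + 1) cs [] [] (by omega)]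
  simp [consHead_nil _ (splitSpec_ne_nil cs)]

theorem isdigit_dot : PySem.Chars.isdigit '.' = false := by decide

theorem fnScan_seen (cs : List Char) (ic : Nat) : ∀ fc,
    fnScan cs true ic fc =
      if cs.all PySem.Chars.isdigit ∧ ic ≠ 0 ∧ fc + cs.length ≠ 0 ∧ fc + cs.length ≤ 2
      then "true" else "false" := by
  induction cs with
  | nil =>
    intro fc
    simp only [fnScan, List.all_nil, List.length_nil, Nat.add_zero]
    split_ifs <;> simp_all <;> omega
  | cons c rest ih =>
    intro fc
    by_cases hc : c = '.'
    · subst hc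
      simp [fnScan, isdigit_dot]
    · by_cases hd : PySem.Chars.isdigit c = true
      · simp only [fnScan, if_neg hc, hd, if_pos, if_true]
        rw [ih (fc + 1)]
        have : fc + 1 + rest.length = fc + (rest.length + 1) := by omega
        simp [hd, this]
      · simp only [fnScan, if_neg hc, hd]
        simp [hd]

theorem fnScan_unseen (cs : List Char) : ∀ ic : Nat,
    fnScan cs false ic 0 =
      if (cs.takeWhile (· ≠ '.')).all PySem.Chars.isdigit ∧
         ic + (cs.takeWhile (· ≠ '.')).length ≠ 0 ∧
         (cs.dropWhile (· ≠ '.') = [] ∨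
           ((cs.dropWhile (· ≠ '.')).tail.all PySem.Chars.isdigit ∧
            (cs.dropWhile (· ≠ '.')).tail ≠ [] ∧
            (cs.dropWhile (· ≠ '.')).tail.length ≤ 2))
      then "true" else "false" := by
  induction cs with
  | nil =>
    intro ic
    simp only [fnScan, List.takeWhile_nil, List.dropWhile_nil, List.all_nil, List.length_nil]
    split_ifs <;> simp_all
  | cons c rest ih =>
    intro ic
    by_cases hc : c = '.'
    · subst hc
      simp only [fnScan, if_pos rfl, Bool.false_eq_true, if_false]
      rw [fnScan_seen rest ic 0]
      simp only [List.takeWhile_cons, List.dropWhile_cons]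
      have hdd : (decide (('.':Char) ≠ '.')) = false := by simp
      simp only [hdd, Bool.false_eq_true, if_false, if_true, List.all_nil, List.length_nil,
        Nat.add_zero, List.tail_cons]
      refine if_congr ?_ rfl rfl
      have hlen : rest = [] ↔ rest.length = 0 := List.length_eq_zero_iff.symm
      constructor
      · rintro ⟨hA, h2, h3, h4⟩
        exact ⟨trivial, h2, Or.inr ⟨hA, fun hn => by rw [hlen] at hn; omega, by omega⟩⟩
      · rintro ⟨-, h2, h | ⟨hA, h3, h4⟩⟩
        · exact absurd h (List.cons_ne_nil _ _)
        · have : rest.length ≠ 0 := fun h0 => h3 (hlen.mpr h0)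
          exact ⟨hA, h2, by omega, by omega⟩
    · by_cases hd : PySem.Chars.isdigit c = true
      · simp only [fnScan, if_neg hc, hd, if_true, Bool.false_eq_true, if_false]
        rw [ih (ic + 1)]
        have hcc : (decide (c ≠ '.')) = true := by simp [hc]
        simp only [List.takeWhile_cons, List.dropWhile_cons, hcc, if_true, List.all_cons, hd,
          Bool.true_and, List.length_cons]
        have h4 : ic + 1 + (rest.takeWhile (fun x => decide (x ≠ '.'))).length
             = ic + ((rest.takeWhile (fun x => decide (x ≠ '.'))).length + 1) := by omega
        rw [h4]
      · simp only [fnScan, if_neg hc, hd, Bool.false_eq_true, if_false]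
        have hcc : (decide (c ≠ '.')) = true := by simp [hc]
        simp only [List.takeWhile_cons, hcc, if_true, List.all_cons, hd, Bool.false_and]
        rw [if_neg]
        rintro ⟨h1, -⟩
        exact absurd h1 (by simp)

theorem splitSpec_no_dot (cs : List Char) (h : '.' ∉ cs) : splitSpec cs = [cs] := by
  induction cs with
  | nil => simp [splitSpec]
  | cons c rest ih =>
    have hc : c ≠ '.' := fun hh => h (hh ▸ List.mem_cons_self ..)
    have hr : '.' ∉ rest := fun hh => h (List.mem_cons_of_mem _ hh)
    simp [splitSpec, hc, ih hr, consHead]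

theorem splitSpec_two_le (cs : List Char) (h : '.' ∈ cs) : 2 ≤ (splitSpec cs).length := by
  induction cs with
  | nil => simp at h
  | cons c rest ih =>
    by_cases hc : c = '.'
    · subst hc
      have h1 : 1 ≤ (splitSpec rest).length := by
        cases hh : splitSpec rest
        · exact absurd hh (splitSpec_ne_nil rest)
        · simp
      simp [splitSpec]
      omega
    · have hr : '.' ∈ rest := by
        rcases List.mem_cons.mp h with h1 | h2
        · exact absurd h1.symm hc
        · exact h2
      cases hh : splitSpec rest with
      | nil => exact absurd hh (splitSpec_ne_nil rest)
      | cons p ps =>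
        have h2 := ih hr
        rw [hh] at h2
        simp only [List.length_cons] at h2
        simp [splitSpec, hc, consHead, hh]
        omega

theorem splitSpec_structure (cs : List Char) :
    splitSpec cs = cs.takeWhile (· ≠ '.') ::
      (match cs.dropWhile (· ≠ '.') with
       | [] => []
       | _ :: t => splitSpec t) := by
  induction cs with
  | nil => simp [splitSpec]
  | cons c rest ih =>
    by_cases hc : c = '.'
    · subst hc
      simp [splitSpec, List.takeWhile_cons, List.dropWhile_cons]
    · simp [splitSpec, hc, ih, consHead]

theorem no_dot_of_all_isdigit (t : List Char) (h : t.all PySem.Chars.isdigit = true) : '.' ∉ t := by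
  intro hm
  have := List.all_eq_true.mp h '.' hm
  simp [isdigit_dot] at this

theorem splitSpec_of_drop_nil (cs : List Char) (hr : cs.dropWhile (· ≠ '.') = []) :
    splitSpec cs = [cs.takeWhile (· ≠ '.')] := by
  rw [splitSpec_structure cs, hr]

theorem splitSpec_of_drop_cons (cs : List Char) (d : Char) (t : List Char)
    (hr : cs.dropWhile (· ≠ '.') = d :: t) :
    splitSpec cs = cs.takeWhile (· ≠ '.') :: splitSpec t := by
  rw [splitSpec_structure cs, hr]

theorem length_ne_zero_of_isEmpty_false (l : List Char) (h : l.isEmpty = false) : l.length ≠ 0 := by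
  cases l with
  | nil => exact absurd h (by simp)
  | cons a l => simp

theorem eq_nil_of_isEmpty_true (l : List Char) (h : l.isEmpty = true) : l = [] := by
  cases l with
  | nil => rfl
  | cons a l => exact absurd h (by simp)

theorem key (cs : List Char) :
    (if 2 < (PySem.Chars.splitOn cs ['.']).length
        || !((PySem.Chars.splitOn cs ['.']).all PySem.Chars.strIsdigit) then "false"
     else if (PySem.Chars.splitOn cs ['.']).length == 2
        && 2 < (PySem.List.pyGetD (PySem.Chars.splitOn cs ['.']) 1 []).length then "false"
     else "true")
    = fnScan cs false 0 0 := by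
  rw [splitOn_eq_splitSpec, fnScan_unseen cs 0]
  cases hr : cs.dropWhile (· ≠ '.') with
  | nil =>
    rw [splitSpec_of_drop_nil cs hr]
    simp only [List.length_cons, List.length_nil, List.all_cons, List.all_nil, Bool.and_true,
      PySem.Chars.strIsdigit, Nat.zero_add, List.tail_nil]
    cases hA : (cs.takeWhile (fun x => decide (x ≠ '.'))).all PySem.Chars.isdigit with
    | false =>
      rw [if_pos (by simp [hA]),
        if_neg (by rintro ⟨h, -⟩; exact absurd h (by simp [hA]))]
    | true =>
      cases hE : (cs.takeWhile (fun x => decide (x ≠ '.'))).isEmpty with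
      | false =>
        rw [if_neg (by simp [hA, hE]), if_neg (by simp),
          if_pos ⟨rfl, length_ne_zero_of_isEmpty_false _ hE, Or.inl trivial⟩]
      | true =>
        rw [if_pos (by simp [hA, hE]),
          if_neg (by
            rintro ⟨-, hL, -⟩
            apply hL
            rw [eq_nil_of_isEmpty_true _ hE]
            rfl)]
  | cons d t =>
    rw [splitSpec_of_drop_cons cs d t hr]
    by_cases ht : '.' ∈ t
    · -- at least three parts on the A side; a second '.' inside t on the B side
      have h2 := splitSpec_two_le t ht
      have htd : t.all PySem.Chars.isdigit = false := by
        by_contra hh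
        exact no_dot_of_all_isdigit t (by simpa using hh) ht
      rw [if_pos, if_neg]
      · rintro ⟨-, -, h | ⟨ha, -, -⟩⟩
        · exact List.cons_ne_nil d t h
        · rw [List.tail_cons] at ha; exact absurd ha (by simp [htd])
      · simp only [List.length_cons, Bool.or_eq_true, decide_eq_true_eq]
        left; omega
    · rw [splitSpec_no_dot t ht]
      have hget : PySem.List.pyGetD
          [cs.takeWhile (· ≠ '.'), t] 1 ([] : List Char) = t := by
        simp [pysem]
      rw [hget]
      simp only [List.length_cons, List.length_nil, List.all_cons, List.all_nil, Bool.and_true,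
        PySem.Chars.strIsdigit, List.tail_cons, Nat.zero_add]
      cases hA : (cs.takeWhile (fun x => decide (x ≠ '.'))).all PySem.Chars.isdigit with
      | false =>
        rw [if_pos (by simp [hA]),
          if_neg (by rintro ⟨h, -⟩; exact absurd h (by simp [hA]))]
      | true =>
        cases hE : (cs.takeWhile (fun x => decide (x ≠ '.'))).isEmpty with
        | true =>
          rw [if_pos (by simp [hA, hE]),
            if_neg (by
              rintro ⟨-, hL, -⟩
              apply hL
              rw [eq_nil_of_isEmpty_true _ hE]
              rfl)]
        | false =>
          cases htA : t.all PySem.Chars.isdigit with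
          | false =>
            rw [if_pos (by simp [htA]),
              if_neg (by
                rintro ⟨-, -, h | ⟨h, -, -⟩⟩
                · exact List.cons_ne_nil d t h
                · exact absurd h (by simp [htA]))]
          | true =>
            cases htE : t.isEmpty with
            | true =>
              rw [if_pos (by simp [htE]),
                if_neg (by
                  rintro ⟨-, -, h | ⟨-, h, -⟩⟩
                  · exact List.cons_ne_nil d t h
                  · exact h (eq_nil_of_isEmpty_true _ htE))]
            | false =>
              rw [if_neg (by simp [hA, hE, htA, htE])]
              by_cases hlt : t.length ≤ 2
              · rw [if_neg (by simp; omega),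
                  if_pos ⟨rfl, length_ne_zero_of_isEmpty_false _ hE,
                    Or.inr ⟨rfl, fun hh => by rw [hh] at htE; exact absurd htE (by simp), hlt⟩⟩]
              · rw [if_pos (by simp; omega),
                  if_neg (by
                    rintro ⟨-, -, h | ⟨-, -, h⟩⟩
                    · exact List.cons_ne_nil d t h
                    · exact hlt h)]

-- ===== VERDICT =====
theorem FormattedNumber_spec : Claim_equal_FormattedNumber := by
  intro strArr _ hpre
  unfold Spec_FormattedNumber
  cases strArr with
  | nil => exact absurd rfl hpre
  | cons s0 rest =>
    show FormattedNumber (s0 :: rest) = FormattedNumber_alt (s0 :: rest)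
    simp only [FormattedNumber, FormattedNumber_alt]
    exact key _
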